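-- pv_equiv track=rewrite | github.com/SLAM-crew/blue_robot | planner22.py | detect_segments_and_turns
-- ===== SOURCE A (Python) =====
-- def detect_segments_and_turns(path):
--     segments = []
--     turning_points = []
--     current_direction = None
--
--     for i in range(1, len(path)):
--         y_diff = path[i][0] - path[i - 1][0]
--         x_diff = path[i][1] - path[i - 1][1]
--         direction = (y_diff, x_diff)
--
--         if direction != current_direction:
--             if current_direction is not None:
--                 # Save the previous segment and mark turning point
--                 segments.append((path[start_idx], path[i - 1]))
--                 turning_points.append(path[i - 1])
--             # Start a new segment
--             current_direction = direction
--             start_idx = i - 1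
--
--     # Add the last segment
--     segments.append((path[start_idx], path[-1]))
--
--     return segments, turning_points
-- ===== SOURCE B (Python) =====
-- def detect_segments_and_turns(path):
--     # Stateless per-point test: an interior point is a turn iff the delta into
--     # it differs from the delta out of it; segments join consecutive boundary
--     # indices (start, turns, end).
--     n = len(path)
--
--     def is_turn(i):
--         return (path[i][0] - path[i - 1][0], path[i][1] - path[i - 1][1]) \
--             != (path[i + 1][0] - path[i][0], path[i + 1][1] - path[i][1])
--
--     turn_idx = [i for i in range(1, n - 1) if is_turn(i)]
--     bounds = [0] + turn_idx + [n - 1]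
--     segments = [(path[a], path[b]) for a, b in zip(bounds, bounds[1:])]
--     turning_points = [path[i] for i in turn_idx]
--     return segments, turning_points
-- ===== Notes on version B (the rewrite author's own statement) =====
-- stated objective: alternative
-- what changed: Replaces A's stateful scan carrying current_direction/start_idx across iterations with a stateless per-index collinearity test (delta into a point vs delta out of it) producing a turn-index list, from which turning points are mapped and segments are read off consecutive boundary indices [0]+turns+[n-1].
import Mathlib
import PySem

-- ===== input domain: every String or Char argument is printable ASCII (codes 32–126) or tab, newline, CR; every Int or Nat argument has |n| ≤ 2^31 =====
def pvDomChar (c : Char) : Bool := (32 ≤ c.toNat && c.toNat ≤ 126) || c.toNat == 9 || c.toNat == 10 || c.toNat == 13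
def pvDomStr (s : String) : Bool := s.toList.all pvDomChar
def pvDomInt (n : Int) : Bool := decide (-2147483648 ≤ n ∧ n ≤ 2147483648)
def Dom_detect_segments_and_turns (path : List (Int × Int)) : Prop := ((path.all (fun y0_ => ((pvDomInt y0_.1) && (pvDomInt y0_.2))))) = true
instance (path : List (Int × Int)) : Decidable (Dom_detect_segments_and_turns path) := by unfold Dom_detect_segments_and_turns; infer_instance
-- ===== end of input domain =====

-- B replaces A's stateful scan by a stateless per-index turn test plus boundary-index arithmetic (same O(n) cost); A raises on paths shorter than 2 points, excluded by Pre_.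


-- ===== PORT A =====
-- loop body of A's `for i in range(1, len(path))`; state = (segments, turning_points, current_direction, start_idx)
def pvStepA (path : List (Int × Int))
    (s : (List ((Int × Int) × (Int × Int))) × (List (Int × Int)) × Option (Int × Int) × Int)
    (i : Int) : (List ((Int × Int) × (Int × Int))) × (List (Int × Int)) × Option (Int × Int) × Int :=
  let pi := PySem.List.pyGetD path i (0, 0)
  let pim := PySem.List.pyGetD path (i - 1) (0, 0)
  let dir : Int × Int := (pi.1 - pim.1, pi.2 - pim.2)
  if some dir ≠ s.2.2.1 then
    if s.2.2.1 ≠ none then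
      (s.1 ++ [(PySem.List.pyGetD path s.2.2.2 (0, 0), pim)], s.2.1 ++ [pim], some dir, i - 1)
    else (s.1, s.2.1, some dir, i - 1)
  else s

def detect_segments_and_turns (path : List (Int × Int)) : (List ((Int × Int) × (Int × Int))) × (List (Int × Int)) :=
  let r := (PySem.List.pyRange 1 (path.length : Int) 1).foldl (pvStepA path) ([], [], none, 0)
  (r.1 ++ [(PySem.List.pyGetD path r.2.2.2 (0, 0), PySem.List.pyGetD path (-1) (0, 0))], r.2.1)

-- ===== PORT B =====
-- Source B's is_turn(i): delta into path[i] differs from delta out of it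
def pvIsTurn (path : List (Int × Int)) (i : Int) : Bool :=
  decide (((PySem.List.pyGetD path i (0, 0)).1 - (PySem.List.pyGetD path (i - 1) (0, 0)).1,
           (PySem.List.pyGetD path i (0, 0)).2 - (PySem.List.pyGetD path (i - 1) (0, 0)).2) ≠
          ((PySem.List.pyGetD path (i + 1) (0, 0)).1 - (PySem.List.pyGetD path i (0, 0)).1,
           (PySem.List.pyGetD path (i + 1) (0, 0)).2 - (PySem.List.pyGetD path i (0, 0)).2))

def detect_segments_and_turns_alt (path : List (Int × Int)) : (List ((Int × Int) × (Int × Int))) × (List (Int × Int)) :=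
  let n : Int := path.length
  let turn_idx := (PySem.List.pyRange 1 (n - 1) 1).filter (pvIsTurn path)
  let bounds := (0 : Int) :: (turn_idx ++ [n - 1])
  let segments := (bounds.zip (PySem.List.slice bounds (some 1) none)).map
      (fun ab => (PySem.List.pyGetD path ab.1 (0, 0), PySem.List.pyGetD path ab.2 (0, 0)))
  (segments, turn_idx.map (fun i => PySem.List.pyGetD path i (0, 0)))

-- ===== PRECONDITION & SPEC =====
-- A raises UnboundLocalError on paths of fewer than 2 points (start_idx is never assigned); those inputs are excluded.
def Pre_detect_segments_and_turns (path : List (Int × Int)) : Prop := 2 ≤ path.length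
instance (path : List (Int × Int)) : Decidable (Pre_detect_segments_and_turns path) := by
  unfold Pre_detect_segments_and_turns; infer_instance

def pvWitness_detect_segments_and_turns : (List (Int × Int)) := [(0, 0), (1, 0), (1, 1)]

def Spec_detect_segments_and_turns (path : List (Int × Int)) (out : (List ((Int × Int) × (Int × Int))) × (List (Int × Int))) : Prop := out = detect_segments_and_turns_alt path
instance (path : List (Int × Int)) (out : (List ((Int × Int) × (Int × Int))) × (List (Int × Int))) : Decidable (Spec_detect_segments_and_turns path out) := by unfold Spec_detect_segments_and_turns; infer_instance

-- ===== CLAIM (what is proved, stated in full; the proofs are below) =====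
def Claim_equal_detect_segments_and_turns : Prop := ∀ (path : List (Int × Int)), Dom_detect_segments_and_turns path → Pre_detect_segments_and_turns path → Spec_detect_segments_and_turns path (detect_segments_and_turns path)

-- ===== LEMMAS AND PROOFS =====

-- common midpoint: process remaining points `rest` in a segment that started at `startPt`,
-- last seen point `prev`, current direction `c`
def pvGo (segs : List ((Int × Int) × (Int × Int))) (turns : List (Int × Int))
    (c : Int × Int) (startPt prev : Int × Int) :
    List (Int × Int) → (List ((Int × Int) × (Int × Int))) × (List (Int × Int))
  | [] => (segs ++ [(startPt, prev)], turns)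
  | q :: rest =>
    if (q.1 - prev.1, q.2 - prev.2) = c then pvGo segs turns c startPt q rest
    else pvGo (segs ++ [(startPt, prev)]) (turns ++ [prev]) (q.1 - prev.1, q.2 - prev.2) prev q rest

theorem pvGo_acc (rest : List (Int × Int)) : ∀ segs turns c startPt prev,
    pvGo segs turns c startPt prev rest =
      (segs ++ (pvGo [] [] c startPt prev rest).1, turns ++ (pvGo [] [] c startPt prev rest).2) := by
  induction rest with
  | nil => intro segs turns c sp pv; simp [pvGo]
  | cons q rest ih =>
    intro segs turns c sp pv
    simp only [pvGo]
    split_ifs with h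
    · rw [ih segs, ih []]
    · simp only [List.nil_append]
      rw [ih (segs ++ [(sp, pv)]), ih [(sp, pv)]]; simp

-- turning points emitted from direction `c` into point `pv`, remaining points the list argument
def pvTurnsFrom (c : Int × Int) (pv : Int × Int) : List (Int × Int) → List (Int × Int)
  | [] => []
  | r :: rest =>
    (if (r.1 - pv.1, r.2 - pv.2) ≠ c then [pv] else []) ++ pvTurnsFrom (r.1 - pv.1, r.2 - pv.2) r rest

def pvLast (pv : Int × Int) : List (Int × Int) → (Int × Int)
  | [] => pv
  | r :: rest => pvLast r rest

-- characterisation of pvGo by turning points and the zip of boundary points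
theorem pvGo_char (rest : List (Int × Int)) : ∀ (c sp pv : Int × Int),
    pvGo [] [] c sp pv rest =
      ((sp :: (pvTurnsFrom c pv rest ++ [pvLast pv rest])).zip (pvTurnsFrom c pv rest ++ [pvLast pv rest]),
       pvTurnsFrom c pv rest) := by
  induction rest with
  | nil => intro c sp pv; simp [pvGo, pvTurnsFrom, pvLast]
  | cons r rest ih =>
    intro c sp pv
    by_cases h : (r.1 - pv.1, r.2 - pv.2) = c
    · simp only [pvGo, pvTurnsFrom, pvLast, h, if_pos, ne_eq, not_true_eq_false, if_false,
        List.nil_append]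
      rw [ih c sp r, ← h]
    · simp only [pvGo, pvTurnsFrom, pvLast, h, if_neg, ne_eq, not_false_eq_true, if_true]
      rw [pvGo_acc, ih (r.1 - pv.1, r.2 - pv.2) pv r]
      simp

-- A-side bridge: the indexed fold from index k equals pvGo on the points after index k-1
theorem loopA (path : List (Int × Int)) (rest : List (Int × Int)) : ∀ (k : Nat),
    1 ≤ k → k ≤ path.length → path.drop k = rest →
    ∀ (segs : List ((Int × Int) × (Int × Int))) (turns : List (Int × Int)) (c : Int × Int)
      (st : Int) (startPt prev : Int × Int),
    PySem.List.pyGetD path ((k : Int) - 1) (0, 0) = prev →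
    PySem.List.pyGetD path st (0, 0) = startPt →
    (((PySem.List.pyRange (k : Int) (path.length : Int) 1).foldl (pvStepA path) (segs, turns, some c, st)).1
       ++ [(PySem.List.pyGetD path
              ((PySem.List.pyRange (k : Int) (path.length : Int) 1).foldl (pvStepA path) (segs, turns, some c, st)).2.2.2 (0, 0),
            PySem.List.pyGetD path (-1) (0, 0))],
     ((PySem.List.pyRange (k : Int) (path.length : Int) 1).foldl (pvStepA path) (segs, turns, some c, st)).2.1)
    = pvGo segs turns c startPt prev rest := by
  induction rest generalizing path with
  | nil =>
    intro k hk1 hkle hdrop segs turns c st sp pv hprev hst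
    have hlen : path.length = k := by
      have := List.drop_eq_nil_iff.mp hdrop; omega
    have hnil : PySem.List.pyRange (k : Int) (path.length : Int) 1 = [] := by
      rw [hlen]; simp
    have hne : path ≠ [] := by intro h; rw [h] at hlen; simp at hlen; omega
    have hlast : PySem.List.pyGetD path (-1) (0, 0) = pv := by
      rw [PySem.List.pyGetD_neg_one _ _ hne, ← hprev]
      have : ((k : Int) - 1) = ((k - 1 : Nat) : Int) := by omega
      rw [this, PySem.List.pyGetD_natCast]
      rw [List.getLast_eq_getElem, List.getD_eq_getElem _ _ (by omega)]
      congr 1; omega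
    simp [hnil, pvGo, hlast, hst]
  | cons q rest ih =>
    intro k hk1 hkle hdrop segs turns c st sp pv hprev hst
    have hklt : k < path.length := by
      have : (path.drop k).length = (q :: rest).length := by rw [hdrop]
      simp at this; omega
    have hq : PySem.List.pyGetD path (k : Int) (0, 0) = q := by
      rw [PySem.List.pyGetD_natCast]
      have : path.getD k (0, 0) = (path.drop k).getD 0 (0, 0) := by
        rw [List.getD_eq_getElem _ _ hklt, List.getD_eq_getElem _ _ (by simp [hdrop])]
        simp [List.getElem_drop]
      rw [this, hdrop]; simp
    have hcons : PySem.List.pyRange (k : Int) (path.length : Int) 1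
        = (k : Int) :: PySem.List.pyRange ((k : Int) + 1) (path.length : Int) 1 :=
      PySem.List.pyRange_one_cons (by exact_mod_cast hklt)
    have hdrop' : path.drop (k + 1) = rest := by
      have h := congrArg (List.drop 1) hdrop
      simpa [List.drop_drop, Nat.add_comm] using h
    rw [hcons]
    simp only [List.foldl_cons]
    by_cases hd : (q.1 - pv.1, q.2 - pv.2) = c
    · have hstep : pvStepA path (segs, turns, some c, st) (k : Int) = (segs, turns, some c, st) := by
        simp only [pvStepA, hq]
        rw [hprev]
        simp [hd]
      rw [hstep]
      have := ih path (k + 1) (by omega) (by omega) hdrop' segs turns c st sp q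
        (by rw [show (((k : Nat) + 1 : Nat) : Int) - 1 = (k : Int) by push_cast; ring]; exact hq) hst
      rw [show (((k : Nat) + 1 : Nat) : Int) = (k : Int) + 1 by push_cast; ring] at this
      rw [this]
      simp [pvGo, hd]
    · have hstep : pvStepA path (segs, turns, some c, st) (k : Int)
          = (segs ++ [(sp, pv)], turns ++ [pv], some (q.1 - pv.1, q.2 - pv.2), (k : Int) - 1) := by
        simp only [pvStepA, hq]
        rw [hprev]
        simp [hd, hst]
      rw [hstep]
      have := ih path (k + 1) (by omega) (by omega) hdrop' (segs ++ [(sp, pv)]) (turns ++ [pv])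
        (q.1 - pv.1, q.2 - pv.2) ((k : Int) - 1) pv q
        (by rw [show (((k : Nat) + 1 : Nat) : Int) - 1 = (k : Int) by push_cast; ring]; exact hq) hprev
      rw [show (((k : Nat) + 1 : Nat) : Int) = (k : Int) + 1 by push_cast; ring] at this
      rw [this]
      simp [pvGo, hd]

-- B-side bridge: the filtered index range, mapped back to points, is pvTurnsFrom
theorem idxTurns (path : List (Int × Int)) (rest : List (Int × Int)) : ∀ (k : Nat) (pv c : Int × Int),
    2 ≤ k → k ≤ path.length → path.drop k = rest →
    PySem.List.pyGetD path ((k : Int) - 1) (0, 0) = pv →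
    PySem.List.pyGetD path ((k : Int) - 2) (0, 0) = (pv.1 - c.1, pv.2 - c.2) →
    ((PySem.List.pyRange ((k : Int) - 1) ((path.length : Int) - 1) 1).filter (pvIsTurn path)).map
        (fun i => PySem.List.pyGetD path i (0, 0)) = pvTurnsFrom c pv rest := by
  induction rest generalizing path with
  | nil =>
    intro k pv c hk2 hkle hdrop hpv hpm
    have hlen : path.length = k := by
      have := List.drop_eq_nil_iff.mp hdrop; omega
    have hnil : PySem.List.pyRange ((k : Int) - 1) ((path.length : Int) - 1) 1 = [] := by
      apply PySem.List.pyRange_one_eq_nil; rw [hlen]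
    simp [hnil, pvTurnsFrom]
  | cons r rest ih =>
    intro k pv c hk2 hkle hdrop hpv hpm
    have hklt : k < path.length := by
      have : (path.drop k).length = (r :: rest).length := by rw [hdrop]
      simp at this; omega
    have hr : PySem.List.pyGetD path (k : Int) (0, 0) = r := by
      rw [PySem.List.pyGetD_natCast]
      have : path.getD k (0, 0) = (path.drop k).getD 0 (0, 0) := by
        rw [List.getD_eq_getElem _ _ hklt, List.getD_eq_getElem _ _ (by simp [hdrop])]
        simp [List.getElem_drop]
      rw [this, hdrop]; simp
    have hcons : PySem.List.pyRange ((k : Int) - 1) ((path.length : Int) - 1) 1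
        = ((k : Int) - 1) :: PySem.List.pyRange (((k : Int) - 1) + 1) ((path.length : Int) - 1) 1 :=
      PySem.List.pyRange_one_cons (by omega)
    have hdrop' : path.drop (k + 1) = rest := by
      have h := congrArg (List.drop 1) hdrop
      simpa [List.drop_drop, Nat.add_comm] using h
    have hturn : pvIsTurn path ((k : Int) - 1)
        = decide ((r.1 - pv.1, r.2 - pv.2) ≠ c) := by
      unfold pvIsTurn
      rw [show ((k : Int) - 1 - 1) = ((k : Int) - 2) by ring,
          show ((k : Int) - 1 + 1) = ((k : Int)) by ring, hpv, hpm, hr]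
      have hsimp : ((pv.1 - (pv.1 - c.1), pv.2 - (pv.2 - c.2)) : Int × Int) = c := by simp
      rw [hsimp]
      simp only [decide_eq_decide]
      exact ne_comm
    have hrec := ih path (k + 1) r (r.1 - pv.1, r.2 - pv.2) (by omega) (by omega) hdrop'
      (by rw [show (((k : Nat) + 1 : Nat) : Int) - 1 = (k : Int) by push_cast; ring]; exact hr)
      (by rw [show (((k : Nat) + 1 : Nat) : Int) - 2 = ((k : Int) - 1) by push_cast; ring, hpv]
          simp)
    rw [show (((k : Nat) + 1 : Nat) : Int) - 1 = ((k : Int) - 1) + 1 by push_cast; ring] at hrec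
    rw [hcons]
    simp only [List.filter_cons, hturn]
    by_cases h : (r.1 - pv.1, r.2 - pv.2) = c
    · simp only [h, ne_eq, not_true_eq_false, decide_false, Bool.false_eq_true, if_false]
      rw [hrec]
      simp [pvTurnsFrom, h]
    · simp only [ne_eq, h, not_false_eq_true, decide_true, if_true, List.map_cons]
      rw [hrec, hpv]
      simp [pvTurnsFrom, h]
theorem zipMap (f : Int → Int × Int) (l1 : List Int) : ∀ (l2 : List Int),
    (l1.zip l2).map (fun ab => (f ab.1, f ab.2)) = (l1.map f).zip (l2.map f) := by
  induction l1 with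
  | nil => intro l2; simp
  | cons a l1 ih =>
    intro l2
    cases l2 with
    | nil => simp
    | cons b l2 => simp [ih]

theorem pvLast_getD : ∀ (l : List (Int × Int)) (pv d : Int × Int),
    (pv :: l).getD l.length d = pvLast pv l := by
  intro l
  induction l with
  | nil => intro pv d; simp [pvLast]
  | cons r l ih => intro pv d; simpa [pvLast] using ih r d

-- ===== VERDICT (by name: the statement is the Claim_ definition above) =====
theorem detect_segments_and_turns_spec : Claim_equal_detect_segments_and_turns := by
  intro path _ hpre
  unfold Spec_detect_segments_and_turns
  match path, hpre with
  | p :: q :: rest, _ =>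
    -- A side
    have hA : detect_segments_and_turns (p :: q :: rest)
        = pvGo [] [] (q.1 - p.1, q.2 - p.2) p q rest := by
      unfold detect_segments_and_turns
      have hlen : ((p :: q :: rest).length : Int) = (rest.length : Int) + 2 := by simp; ring
      have hcons : PySem.List.pyRange 1 ((p :: q :: rest).length : Int) 1
          = 1 :: PySem.List.pyRange 2 ((p :: q :: rest).length : Int) 1 := by
        apply PySem.List.pyRange_one_cons; rw [hlen]; omega
      rw [hcons]
      simp only [List.foldl_cons]
      have h0 : PySem.List.pyGetD (p :: q :: rest) (0 : Int) (0, 0) = p := by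
        simp [PySem.List.pyGetD_zero_cons]
      have h1 : PySem.List.pyGetD (p :: q :: rest) (1 : Int) (0, 0) = q := by
        rw [show (1 : Int) = ((1 : Nat) : Int) by norm_num, PySem.List.pyGetD_natCast]; rfl
      have hstep : pvStepA (p :: q :: rest) ([], [], none, 0) 1
          = ([], [], some (q.1 - p.1, q.2 - p.2), 0) := by
        simp only [pvStepA, h1, show (1 : Int) - 1 = (0 : Int) by ring, h0]
        simp
      rw [hstep]
      have := loopA (p :: q :: rest) rest 2 (by omega) (by simp) (by simp)
        [] [] (q.1 - p.1, q.2 - p.2) 0 p q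
        (by rw [show ((2 : Nat) : Int) - 1 = (1 : Int) by norm_num]; exact h1) h0
      rw [show ((2 : Nat) : Int) = (2 : Int) by norm_num] at this
      exact this
    -- B side
    have hB : detect_segments_and_turns_alt (p :: q :: rest)
        = pvGo [] [] (q.1 - p.1, q.2 - p.2) p q rest := by
      unfold detect_segments_and_turns_alt
      dsimp only
      have h0 : PySem.List.pyGetD (p :: q :: rest) (0 : Int) (0, 0) = p := by
        simp [PySem.List.pyGetD_zero_cons]
      have h1 : PySem.List.pyGetD (p :: q :: rest) (1 : Int) (0, 0) = q := by
        rw [show (1 : Int) = ((1 : Nat) : Int) by norm_num, PySem.List.pyGetD_natCast]; rfl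
      have hturns := idxTurns (p :: q :: rest) rest 2 q (q.1 - p.1, q.2 - p.2)
        (by omega) (by simp) (by simp)
        (by rw [show ((2 : Nat) : Int) - 1 = (1 : Int) by norm_num]; exact h1)
        (by rw [show ((2 : Nat) : Int) - 2 = (0 : Int) by norm_num, h0]
            simp)
      rw [show ((2 : Nat) : Int) - 1 = (1 : Int) by norm_num] at hturns
      have hlast : PySem.List.pyGetD (p :: q :: rest) (((p :: q :: rest).length : Int) - 1) (0, 0)
          = pvLast q rest := by
        rw [show (((p :: q :: rest).length : Int) - 1) = (((q :: rest).length : Nat) : Int) by simp,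
            PySem.List.pyGetD_natCast]
        exact pvLast_getD (q :: rest) p (0, 0)
      rw [pvGo_char]
      rw [PySem.List.slice_from_one]
      simp only [List.tail_cons]
      rw [zipMap (fun i => PySem.List.pyGetD (p :: q :: rest) i (0, 0))]
      simp only [List.map_cons, List.map_append, List.map_cons, List.map_nil]
      rw [hturns, h0, hlast]
    rw [hA, hB]
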